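/- GENERATED by mk_final_copies.py from the proof of the farm's unit `compute_codewords.7` (farm:compute_codewords.7.1: Proof.lean) as the
   re-elaboration sweep compiled it — do not edit. -/
import Asan.CheckWalk
import Vorbis.Spec.Units.compute_codewords_7

/- THE WORKED PROOF OF `compute_codewords.7` (in the farm's format): segment 7 of `compute_codewords`, 0x1082c5 – 0x1082e9 + 0x1082c2 +
   0x1083e4 – 0x1083e9 + 0x1083b3 – 0x1083dc (stb_vorbis_fixed.c 1152 – 1153 `while (z > 0 && !available[z]) --z; if (z == 0) return FALSE;`):
   from the assertion `AtScan i` at `cut5` through loop 1143 (its induction is inside the segment: `u_loop`) to `AtRes i z` at `chk5`,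
   or through the epilogue to the `ret` with eax = 0. Adapted from the lemma `seg6a` of the worker of `compute_codewords` (attempt 1):
   the walk `cw7_walk` is continuation-passing, the unit theorem feeds it the fields of `AtScan` and rebuilds `AtRes`. -/
open X86 X86.User Asan Vorbis Vorbis.Spec
open Vorbis.Spec.compute_codewords

set_option maxRecDepth 4000
set_option maxHeartbeats 4000000

namespace Vorbis.Spec.compute_codewords_7

/-- **The walk of segment 7: cut5 0x1082c5 → loop 1143 `while (z > 0 && !available[z]) --z;` → either `z == 0`: `return FALSE` through
0x1083e4 and the epilogue to the `ret` (eax = 0; `hret` takes the `Returned`), or chk5 0x1082ee (`res = available[z]`, `1 ≤ z ≤ z0 ≤ 31`;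
`hcont` takes the state with its facts)**. `r13`, `r12`, `rbp` (the values `A`, `B`, `C`) are never written on the way. -/
theorem cw7_walk {Lay : Layout} (hLay : Lay.hi = 0x1000000) {μ : Microarch} (hμ : UserX.MicroOK μ) {u₀ : State}
    (hcode : HasCodeNat Lay u₀ Vorbis.L.compute_codewords.entry Vorbis.Code.code_compute_codewords.nat Vorbis.L.compute_codewords.size)
    (hload4 : Asan.SmallCheck Lay μ Vorbis.WayInv (Vorbis.CodeOK u₀) [.rax, .rcx, .rdx] 4 Vorbis.L.__asan_load4_noabort.entry)
    {others : List Obj} {frames : List (Nat × FrameLayout)} {Blk : Block → Prop} {u : State} {ret : Word}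
    (hsh : ShadowPre others frames u)
    (hinvB : ShadowInv others (((u.reg .rsp).toNat - 248, Vorbis.Frames.compute_codewords) :: frames)
      ((u.reg .rsp).toNat - 296) (cw_poisonedMem u))
    (he_room : 7340032 + 400 ≤ (u.reg .rsp).toNat)
    (he_top : (u.reg .rsp).toNat + 8 ≤ 8388608) (he_ret_lt : ret < 1073741824) (he_stack : Lay.Has (u.reg .rsp - 400) 408)
    {s : State} {ws : List Span} (z0 : Nat) (A B C : Word)
    (w_rip : s.rip = Vorbis.L.compute_codewords.cut5) (w_rbx : s.reg .rbx = Word.ofBV (BitVec.ofNat 32 z0)) (hz0 : z0 ≤ 31)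
    (w_r13 : s.reg .r13 = A) (w_r12 : s.reg .r12 = B) (w_rbp : s.reg .rbp = C)
    (w_kept : RegsKept cw_allRegs u s) (hb : CwBody u₀ u ret ws s)
    (hslot : UInt64.ofNat (s.mem.readLE (u.reg .rsp - 256) 8) = (u.reg .rsp - 248) >>> 3)
    (hfoot : ∀ S : Mem, Mem.SameExcept (⟨(u.reg .rsp).toNat - 400, (u.reg .rsp).toNat⟩ ::
      ⟨0xC00000 + ((u.reg .rsp).toNat - 248) / 8, 0xC00000 + ((u.reg .rsp).toNat - 248) / 8 + 24⟩ :: ws) u.mem S →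
      Mem.SameExcept ((Vorbis.Spec.compute_codewords.spec others frames Blk).footprint u) u.mem S)
    {Q : State → Prop}
    (hret : ∀ v : State, Returned (Vorbis.conv u₀) (Vorbis.Spec.compute_codewords.spec others frames Blk) u ret v → Q v)
    (hcont : ∀ (s' : State) (z : Nat), s'.rip = Vorbis.L.compute_codewords.chk5 → 1 ≤ z → z ≤ z0 →
      s'.reg .rbx = Word.ofBV (BitVec.ofNat 32 z) →
      s'.reg .r15 = Word.ofBV (BitVec.signExtend 64 (BitVec.ofNat 32 z)) →
      s'.reg .rdi = u.reg .rsp - 296 + Word.ofBV (BitVec.signExtend 64 (BitVec.ofNat 32 z)) * 4 + 80 →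
      s'.reg .r13 = A → s'.reg .r12 = B → s'.reg .rbp = C →
      UInt64.ofNat (s'.mem.readLE (u.reg .rsp - 256) 8) = (u.reg .rsp - 248) >>> 3 →
      Mem.SameExcept [⟨(u.reg .rsp).toNat - 304, (u.reg .rsp).toNat - 296⟩] s.mem s'.mem → CwBody u₀ u ret ws s' →
      ReachVia Lay μ Vorbis.WayInv s' Q) :
    ReachVia Lay μ Vorbis.WayInv s Q := by
  obtain ⟨w_rsp, w_eq, hdf, hmx, hsame, hbody, hs0, hs1, hs2, hs3, hs4, hs5, hs6, hsLen, hsC, hsVal, hsN⟩ := hb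
  have hsp := hsh.rsp
  have hN : ShadowUntouched u.mem (cw_prologueMem u) := by
    unfold cw_prologueMem
    v_untouched
  have ea1 : ((u.reg .rsp - 248) >>> 3 + 12582912).toNat = 12582912 + ((u.reg .rsp).toNat - 248) / 8 := by
    u_omega
  have ea2 : ((u.reg .rsp - 248) >>> 3 + 12582932).toNat = 12582932 + ((u.reg .rsp).toNat - 248) / 8 := by
    u_omega
  unfold cw_allRegs at w_kept
  -- 0x1082c5: the head of loop 1143
  obtain ⟨m0, hm0⟩ : ∃ m0 : Mem, m0 = s.mem := ⟨_, rfl⟩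
  rw [← hm0] at hcont
  obtain ⟨z, hz13, hzle, hE0⟩ : ∃ z : Nat, s.reg .rbx = Word.ofBV (BitVec.ofNat 32 z) ∧ z ≤ z0 ∧
      Mem.SameExcept [⟨(u.reg .rsp).toNat - 304, (u.reg .rsp).toNat - 296⟩] m0 s.mem :=
    ⟨z0, w_rbx, Nat.le_refl _, by rw [hm0]; exact Mem.SameExcept.refl _ _⟩
  have h0rsp := w_rsp
  have h0eq := w_eq
  clear w_rbx hm0
  u_loop [z] (fun v => (v.reg .rbx).toNat)
  u_walk hcode [hμ.vendor] until [Vorbis.L.compute_codewords.loop3, Vorbis.L.compute_codewords.chk5] span [Vorbis.L.textLo, Vorbis.L.textHi] side (v_side)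
  · -- check_1082d1: `available[z]`, `1 ≤ z ≤ 31`
    have hun : ShadowUntouched (cw_poisonedMem u) s_1082d1.mem := by
      rw [w_mem]
      exact Mem.EqOn.step_writeLE _ _ _ hbody (by u_omega) (by u_omega)
    exact cw_check_available (u.reg .rsp).toNat hinvB hun (by omega) _ z (by omega)
      (cw_avail_addr (u.reg .rsp) z (by omega) he_room he_top)
  · -- `z ≤ 0` and `z == 0`: `return FALSE`: 0x1083e4 → the epilogue → the `ret`, eax = 0
    have hz : z = 0 := by
      omega
    refine ReachVia.done (Or.inl (hret _ ?_))
    v_returned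
    · refine ⟨?_, Or.inl ?_, ?_⟩
      · rw [w_mem]
        exact cw_frame_popped (u.reg .rsp) hsh.inv.stack.clean (by omega) he_top hN hbody
      · rw [w_rax, hz]
        rfl
      · intro h1
        exfalso
        rw [w_rax, hz] at h1
        exact absurd h1 (by decide)
    · apply hfoot
      u_same
  · -- `z ≤ 0` and `z ≠ 0`: impossible
    exfalso
    have hm := cw_msb_lit32 z (by omega)
    rw [hm] at hbr_1082c7
    simp only [Bool.false_eq_true, or_false] at hbr_1082c7
    exact hbr_1082e0 hbr_1082c7
  · -- the back edge: `z > 0`, `available[z] == 0`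
    have hz1 : 1 ≤ z := by
      omega
    u_loop_back [z - 1]
    · exact (show X86.User.abiInv s_1082c2 from by v_inv).1
    · exact (show X86.User.abiInv s_1082c2 from by v_inv).2
    · rw [w_mem]
      exact Mem.EqOn.step_writeLE _ _ _ hbody (by u_omega) (by u_omega)
    · rw [w_rbx, cw_dec_lit32 z hz1 (by omega)]
    · omega
    · rw [w_rbx, cw_dec_lit32 z hz1 (by omega), cw_cnt_toNat _ (by omega), cw_cnt_toNat _ (by omega)]
      omega
  · -- `z > 0`, `available[z] ≠ 0`, `z == 0`: impossible
    exfalso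
    omega
  · -- `z > 0`, `available[z] ≠ 0`: on to chk5
    have hz1 : 1 ≤ z := by
      omega
    have hbK : CwBody u₀ u ret ws s :=
      ⟨h0rsp, h0eq, hdf, hmx, hsame, hbody, hs0, hs1, hs2, hs3, hs4, hs5, hs6, hsLen, hsC, hsVal, hsN⟩
    have hE : Mem.EqOn ((u.reg .rsp).toNat - 296) ((u.reg .rsp).toNat + 8) s.mem s_1082e9.mem := by
      rw [w_mem]
      exact Mem.EqOn.writeLE _ _ _ _ _ _ (by u_omega) (by u_omega)
    have hi : X86.User.abiInv s_1082e9 := by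
      v_inv
    have hslot' : UInt64.ofNat (s_1082e9.mem.readLE (u.reg .rsp - 256) 8) = (u.reg .rsp - 248) >>> 3 := by
      u_frame hslot
    have hE0' : Mem.SameExcept [⟨(u.reg .rsp).toNat - 304, (u.reg .rsp).toNat - 296⟩] m0 s_1082e9.mem := by
      rw [w_mem]
      exact hE0.step_writeLE' _ _ _ (by u_omega) (by
        simp only [X86.User.inSpans_cons, X86.User.inSpans_nil, or_false]
        u_omega)
    refine (hcont s_1082e9 z w_rip hz1 hzle w_rbx w_r15 w_rdi w_r13 w_r12 w_rbp hslot' hE0'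
      (hbK.carry hE he_room he_top w_rsp w_eq hi.1 hi.2 ?_ ?_)).mono (fun v h => Or.inl h)
    · u_same
    · rw [w_mem]
      exact Mem.EqOn.step_writeLE _ _ _ hbody (by u_omega) (by u_omega)

end Vorbis.Spec.compute_codewords_7

/-- Segment 7 of `compute_codewords`: from `AtScan i` at `cut5` to `AtRes i z` at `chk5`, or to the `ret` (`return FALSE`). The entry
state's facts come from the `AtEntry` the assertion carries; the walk is `cw7_walk`; `AtRes.val` is `AtScan.val` carried over the dead
return addresses of the check calls (`cw_val_carry`). -/
theorem Vorbis.Spec.Worked.compute_codewords_7_ok : Vorbis.Spec.compute_codewords_7.Statement := by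
  intro Lay hLay μ hμ u₀ hcode hload4 others frames Blk u ret i v hat
  -- the entry state's facts, from the assertion
  have he := hat.entry
  v_entry he
  have hpre := hat.pre
  have hinvB := cw_inv_pushed hpre.shadow he_align he_room he_top
  have hz0 := cw_len_le31 hpre hat.i_lt hat.used
  refine Vorbis.Spec.compute_codewords_7.cw7_walk hLay hμ hcode hload4 hpre.shadow hinvB he_room he_top he_ret_lt he_stack
    (u.mem.u8 ((u.reg .rsi).toNat + i)) _ _ _ hat.rip hat.rbx hz0 hat.r13 hat.r12 hat.rbp (cw_kept_all u v) hat.body hat.slot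
    (cw_foot_of_body others frames Blk u (cwWindows u) (fun _ h => h)) (fun w hw => Or.inr hw) ?_
  intro s' z hrip hz1 hzle hrbx hr15 hrdi hr13 hr12 hrbp hslot hsame hbody
  refine ReachVia.done (Or.inl ⟨z, ?_⟩)
  exact {
    entry := hat.entry
    pre := hpre
    body := hbody
    rip := hrip
    i_lt := hat.i_lt
    used := hat.used
    z_pos := hz1
    z_le := hzle
    r13 := hr13
    r12 := hr12
    rbp := hrbp
    rbx := hrbx
    r15 := hr15
    rdi := hrdi
    slot := hslot
    val := by
      intro hsparse
      refine cw_val_carry hpre he_room he_top hsparse (cw_used_le hpre hsparse (Nat.le_of_lt hat.i_lt)) (hat.val hsparse) hsame ?_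
      intro w hw
      have e : w = ⟨(u.reg .rsp).toNat - 304, (u.reg .rsp).toNat - 296⟩ := List.mem_singleton.mp hw
      subst e
      left
      show 0x700000 ≤ (u.reg .rsp).toNat - 304 ∧ (u.reg .rsp).toNat - 296 ≤ (u.reg .rsp).toNat + 8
      omega }
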